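-- pv_equiv track=rewrite | github.com/MrBrantCode/unitest_baseline | mut_generate/mist_train_taco/taco_18487/solution.py | count_square_subsequences
-- ===== SOURCE A (Python) =====
-- def count_square_subsequences(S: str) -> int:
--     """
--     Counts the number of non-empty subsequences of the string S that are square strings.
--
--     A square string is a string that can be obtained by concatenating two copies of the same string.
--
--     Parameters:
--     S (str): The input string for which square subsequences need to be counted.
--
--     Returns:
--     int: The number of square subsequences modulo 1000000007.
--     """
--     def count_subsequences(s, t):
--         m = len(s)
--         n = len(t)
--         T = [[0 for _ in range(n)] for _ in range(m)]
--         T[0][0] = 1 if s[0] == t[0] else 0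
--         for i in range(1, n):
--             T[0][i] = T[0][i - 1] + (1 if s[0] == t[i] else 0)
--             T[0][i] %= 1000000007
--         for i in range(1, m):
--             T[i][0] = T[i - 1][0]
--             T[i][0] %= 1000000007
--         for i in range(1, m):
--             for j in range(1, n):
--                 T[i][j] = T[i - 1][j] + T[i][j - 1] + (0 if s[i] == t[j] else -T[i - 1][j - 1])
--                 T[i][j] %= 1000000007
--         return T[m - 1][n - 1]
--
--     m = len(S)
--     R = 0
--     for i in range(1, m):
--         R += count_subsequences(S[i:], S[:i])
--         R %= 1000000007
--     return R
-- ===== SOURCE B (Python) =====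
-- def count_square_subsequences(S: str) -> int:
--     """Counts square subsequences of S modulo 1000000007 by inclusion-exclusion:
--     for each split point i, the squares whose second half starts exactly at i are
--     common(S[i:], S[:i]) - common(S[i+1:], S[:i]), where common(s, t) counts pairs
--     of equal non-empty subsequences of s and t via the standard
--     common-subsequence-counting DP, kept as a rolling 1-D row."""
--     MOD = 1000000007
--
--     def common(s, t):
--         prev = [0] * (len(t) + 1)
--         for c in s:
--             cur = [0]
--             for pj, pj1, d in zip(prev, prev[1:], t):
--                 cur.append((pj1 + cur[-1] - pj
--                             + (pj + 1 if c == d else 0)) % MOD)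
--             prev = cur
--         return prev[len(t)]
--
--     total = 0
--     for i in range(1, len(S)):
--         total = (total + common(S[i:], S[:i]) - common(S[i + 1:], S[:i])) % MOD
--     return total
-- ===== Notes on version B (the rewrite author's own statement) =====
-- stated objective: alternative
-- what changed: B replaces A's per-split constrained DP over a full 2-D table (with a negative correction term on mismatches) by inclusion-exclusion of two standard common-subsequence-counting DPs, common(S[i:],S[:i]) - common(S[i+1:],S[:i]), each run with a rolling 1-D row.
import Mathlib
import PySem

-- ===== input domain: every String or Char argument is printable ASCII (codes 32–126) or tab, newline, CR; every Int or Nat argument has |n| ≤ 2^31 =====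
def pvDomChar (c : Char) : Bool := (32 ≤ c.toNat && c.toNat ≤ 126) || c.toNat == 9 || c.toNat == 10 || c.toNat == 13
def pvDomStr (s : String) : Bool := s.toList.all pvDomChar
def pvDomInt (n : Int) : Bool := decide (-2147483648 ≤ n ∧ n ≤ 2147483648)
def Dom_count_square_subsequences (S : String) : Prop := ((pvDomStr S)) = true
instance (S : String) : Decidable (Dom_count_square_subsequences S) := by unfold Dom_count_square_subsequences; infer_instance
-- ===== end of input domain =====

-- B replaces A's per-split constrained DP by inclusion-exclusion of two standard
-- common-subsequence-counting DPs with a rolling row; same O(n^3) cost (objective: alternative).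

-- ===== PORT A =====
-- the modulus 1000000007 shared by both programs
def pvP : Int := 1000000007

-- T[i][j] read/write on the 2-D list; every use below has 0 ≤ i,j in range
def tget (T : List (List Int)) (i j : Int) : Int :=
  PySem.List.pyGetD (PySem.List.pyGetD T i []) j 0

def tset (T : List (List Int)) (i j : Int) (v : Int) : List (List Int) :=
  T.set i.toNat ((PySem.List.pyGetD T i []).set j.toNat v)

-- literal port of A's inner helper count_subsequences(s, t); the two Python
-- statements 'x = e; x %= MOD' are written as the single modded store '(e) % pvP'
def countSubA (s t : List Char) : Int :=
  let m : Int := s.length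
  let n : Int := t.length
  let T0 : List (List Int) := List.replicate m.toNat (List.replicate n.toNat (0 : Int))
  let T1 := tset T0 0 0 (if PySem.List.pyGetD s 0 ' ' = PySem.List.pyGetD t 0 ' ' then 1 else 0)
  let T2 := (PySem.List.pyRange 1 n 1).foldl (fun T i =>
      tset T 0 i ((tget T 0 (i - 1) +
        (if PySem.List.pyGetD s 0 ' ' = PySem.List.pyGetD t i ' ' then 1 else 0)) % pvP)) T1
  let T3 := (PySem.List.pyRange 1 m 1).foldl (fun T i =>
      tset T i 0 (tget T (i - 1) 0 % pvP)) T2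
  let T4 := (PySem.List.pyRange 1 m 1).foldl (fun T i =>
      (PySem.List.pyRange 1 n 1).foldl (fun T j =>
        tset T i j ((tget T (i - 1) j + tget T i (j - 1) +
          (if PySem.List.pyGetD s i ' ' = PySem.List.pyGetD t j ' ' then 0
           else -(tget T (i - 1) (j - 1)))) % pvP)) T) T3
  tget T4 (m - 1) (n - 1)

def count_square_subsequences (S : String) : Int :=
  let L := S.toList
  let m : Int := L.length
  (PySem.List.pyRange 1 m 1).foldl (fun R i =>
    (R + countSubA (PySem.List.slice L (some i) none) (PySem.List.slice L none (some i))) % pvP) 0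

-- ===== PORT B =====
-- literal port of Source B's common(s, t): rolling row over zip(prev, prev[1:], t)
def commonB (s t : List Char) : Int :=
  let prev0 : List Int := List.replicate (t.length + 1) (0 : Int)
  let prev := s.foldl (fun prev c =>
      ((prev.zip (PySem.List.slice prev (some 1) none)).zip t).foldl (fun cur x =>
        cur ++ [(x.1.2 + PySem.List.pyGetD cur (-1) 0 - x.1.1 +
                 (if c = x.2 then x.1.1 + 1 else 0)) % pvP]) [0]) prev0
  PySem.List.pyGetD prev (t.length : Int) 0

def count_square_subsequences_alt (S : String) : Int :=
  let L := S.toList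
  let m : Int := L.length
  (PySem.List.pyRange 1 m 1).foldl (fun total i =>
    (total + commonB (PySem.List.slice L (some i) none) (PySem.List.slice L none (some i))
           - commonB (PySem.List.slice L (some (i + 1)) none) (PySem.List.slice L none (some i))) % pvP) 0

-- ===== PRECONDITION & SPEC =====
def Spec_count_square_subsequences (S : String) (out : Int) : Prop := out = count_square_subsequences_alt S
instance (S : String) (out : Int) : Decidable (Spec_count_square_subsequences S out) := by unfold Spec_count_square_subsequences; infer_instance

-- ===== CLAIM (what is proved, stated in full; the proofs are below) =====
def Claim_equal_count_square_subsequences : Prop := ∀ (S : String), Dom_count_square_subsequences S → Spec_count_square_subsequences S (count_square_subsequences S)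

-- ===== LEMMAS AND PROOFS =====
abbrev Zp := ZMod 1000000007

def zval (z : Zp) : Int := (z.val : Int)

lemma cast_zval (z : Zp) : ((zval z : Int) : Zp) = z := by
  simp [zval, ZMod.natCast_val, ZMod.cast_id]

lemma mod_eq_zval (x : Int) : x % pvP = zval ((x : Zp)) := by
  unfold zval pvP
  rw [ZMod.val_intCast]
  norm_num

lemma zval_zero : zval 0 = 0 := by simp [zval]

lemma zval_one : zval 1 = 1 := rfl

-- model of B's DP: number (mod p) of pairs of equal non-empty subsequences of
-- the first i chars of s and the first j chars of t
def NnZ (s t : List Char) : ℕ → ℕ → Zp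
  | 0, _ => 0
  | _ + 1, 0 => 0
  | i + 1, j + 1 =>
      NnZ s t i (j + 1) + NnZ s t (i + 1) j - NnZ s t i j +
        (if s.getD i ' ' = t.getD j ' ' then NnZ s t i j + 1 else 0)

-- model of A's DP table T
def TaZ (s t : List Char) : ℕ → ℕ → Zp
  | 0, 0 => if s.getD 0 ' ' = t.getD 0 ' ' then 1 else 0
  | 0, j + 1 => TaZ s t 0 j + (if s.getD 0 ' ' = t.getD (j + 1) ' ' then 1 else 0)
  | i + 1, 0 => TaZ s t i 0
  | i + 1, j + 1 =>
      TaZ s t i (j + 1) + TaZ s t (i + 1) j +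
        (if s.getD (i + 1) ' ' = t.getD (j + 1) ' ' then 0 else -(TaZ s t i j))

lemma getD_tail (s : List Char) (k : ℕ) (d : Char) : s.tail.getD k d = s.getD (k + 1) d := by
  cases s <;> simp [List.getD]

lemma NnZ_zero (s t : List Char) (j : ℕ) : NnZ s t 0 j = 0 := by simp only [NnZ]

lemma NnZ_succ_zero (s t : List Char) (i : ℕ) : NnZ s t (i + 1) 0 = 0 := by simp only [NnZ]

lemma NnZ_step (s t : List Char) (i j : ℕ) :
    NnZ s t (i + 1) (j + 1) =
      NnZ s t i (j + 1) + NnZ s t (i + 1) j - NnZ s t i j +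
        (if s.getD i ' ' = t.getD j ' ' then NnZ s t i j + 1 else 0) := by
  rw [NnZ]

lemma NnZ_any_zero (s t : List Char) (i : ℕ) : NnZ s t i 0 = 0 := by
  cases i
  · exact NnZ_zero s t 0
  · exact NnZ_succ_zero s t _

lemma TaZ_zz (s t : List Char) : TaZ s t 0 0 = if s.getD 0 ' ' = t.getD 0 ' ' then 1 else 0 := by
  rw [TaZ]

lemma TaZ_zs (s t : List Char) (j : ℕ) :
    TaZ s t 0 (j + 1) = TaZ s t 0 j + (if s.getD 0 ' ' = t.getD (j + 1) ' ' then 1 else 0) := by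
  rw [TaZ]

lemma TaZ_sz (s t : List Char) (i : ℕ) : TaZ s t (i + 1) 0 = TaZ s t i 0 := by rw [TaZ]

lemma TaZ_ss (s t : List Char) (i j : ℕ) :
    TaZ s t (i + 1) (j + 1) =
      TaZ s t i (j + 1) + TaZ s t (i + 1) j +
        (if s.getD (i + 1) ' ' = t.getD (j + 1) ' ' then 0 else -(TaZ s t i j)) := by
  rw [TaZ]

-- the key identity: A's constrained DP = inclusion-exclusion of B's DP
lemma keyTN (s t : List Char) (i j : ℕ) :
    TaZ s t i j = NnZ s t (i + 1) (j + 1) - NnZ s.tail t i (j + 1) := by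
  induction i generalizing j with
  | zero =>
    induction j with
    | zero =>
      rw [TaZ_zz, NnZ_step]
      simp only [NnZ_zero, NnZ_succ_zero]
      split_ifs <;> ring
    | succ j ihj =>
      rw [TaZ_zs, ihj, NnZ_step s t 0 (j + 1)]
      simp only [NnZ_zero]
      split_ifs <;> ring
  | succ i ihi =>
    induction j with
    | zero =>
      rw [TaZ_sz, ihi 0, NnZ_step s t (i + 1) 0, NnZ_step s.tail t i 0]
      simp only [NnZ_succ_zero, NnZ_any_zero, getD_tail]
      split_ifs <;> ring
    | succ j ihj =>
      rw [TaZ_ss, ihi (j + 1), ihj, ihi j, NnZ_step s t (i + 1) (j + 1),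
          NnZ_step s.tail t i (j + 1), getD_tail]
      split_ifs <;> ring

-- ---------- 2-D table machinery for port A ----------

def tg (T : List (List Int)) (i j : ℕ) : Int := (T.getD i []).getD j 0

lemma tget_natCast (T : List (List Int)) (i j : ℕ) : tget T (i : Int) (j : Int) = tg T i j := by
  simp [tget, tg, PySem.List.pyGetD_natCast]

lemma tset_natCast (T : List (List Int)) (i j : ℕ) (v : Int) :
    tset T (i : Int) (j : Int) v = T.set i ((T.getD i []).set j v) := by
  simp [tset, PySem.List.pyGetD_natCast]

lemma tget_zero_natCast (T : List (List Int)) (j : ℕ) : tget T 0 (j : Int) = tg T 0 j := by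
  simpa using tget_natCast T 0 j

lemma tget_natCast_zero (T : List (List Int)) (i : ℕ) : tget T (i : Int) 0 = tg T i 0 := by
  simpa using tget_natCast T i 0

lemma tset_zero_natCast (T : List (List Int)) (j : ℕ) (v : Int) :
    tset T 0 (j : Int) v = T.set 0 ((T.getD 0 []).set j v) := by
  simpa using tset_natCast T 0 j v

lemma tset_natCast_zero (T : List (List Int)) (i : ℕ) (v : Int) :
    tset T (i : Int) 0 v = T.set i ((T.getD i []).set 0 v) := by
  simpa using tset_natCast T i 0 v

lemma tset_zero_zero (T : List (List Int)) (v : Int) :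
    tset T 0 0 v = T.set 0 ((T.getD 0 []).set 0 v) := by
  simpa using tset_natCast T 0 0 v

lemma pyGetD_zero_char (s : List Char) : PySem.List.pyGetD s 0 ' ' = s.getD 0 ' ' := by
  simpa using PySem.List.pyGetD_natCast s 0 ' '

def ShapeT (T : List (List Int)) (m n : ℕ) : Prop := T.length = m ∧ ∀ r ∈ T, r.length = n

lemma getD_row_mem (T : List (List Int)) (i : ℕ) (h : i < T.length) : T.getD i [] ∈ T := by
  rw [List.getD_eq_getElem T [] h]; exact List.getElem_mem h

lemma shape_replicate (m n : ℕ) : ShapeT (List.replicate m (List.replicate n (0 : Int))) m n := by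
  refine ⟨by simp, ?_⟩
  intro r hr
  rw [List.eq_of_mem_replicate hr]
  simp

lemma shape_set {T : List (List Int)} {m n : ℕ} (h : ShapeT T m n) {i : ℕ} (hi : i < m)
    (j : ℕ) (v : Int) : ShapeT (T.set i ((T.getD i []).set j v)) m n := by
  obtain ⟨hl, hr⟩ := h
  refine ⟨by simp [hl], ?_⟩
  intro r hrm
  rcases List.mem_or_eq_of_mem_set hrm with hm | he
  · exact hr r hm
  · subst he
    rw [List.length_set]
    exact hr _ (getD_row_mem T i (by omega))

lemma tg_set_self {T : List (List Int)} {m n : ℕ} (h : ShapeT T m n) {i j : ℕ}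
    (hi : i < m) (hj : j < n) (v : Int) :
    tg (T.set i ((T.getD i []).set j v)) i j = v := by
  obtain ⟨hl, hr⟩ := h
  have hi' : i < T.length := by omega
  have hrow : (T.getD i []).length = n := hr _ (getD_row_mem T i hi')
  have hj' : j < ((T.getD i []).set j v).length := by rw [List.length_set, hrow]; omega
  unfold tg
  rw [List.getD_eq_getElem (T.set i ((T.getD i []).set j v)) [] (by simpa using hi'),
      List.getElem_set_self (by simpa using hi'),
      List.getD_eq_getElem _ 0 hj',
      List.getElem_set_self (by rw [List.length_set, hrow]; omega)]

lemma tg_set_ne {T : List (List Int)} (i j : ℕ) (v : Int) {i' j' : ℕ}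
    (hne : ¬(i' = i ∧ j' = j)) :
    tg (T.set i ((T.getD i []).set j v)) i' j' = tg T i' j' := by
  unfold tg
  by_cases hii : i' = i
  · subst hii
    have hjj : j' ≠ j := fun h => hne ⟨rfl, h⟩
    by_cases hlen : i' < T.length
    · rw [List.getD_eq_getElem (T.set i' _) [] (by simpa using hlen),
          List.getElem_set_self (by simpa using hlen),
          List.getD_eq_getElem T [] hlen]
      simp only [List.getD]
      rw [List.getElem?_set_ne (fun h => hjj h.symm)]
    · have h1 : (T.set i' ((T.getD i' []).set j v)).getD i' [] = [] := by
        apply List.getD_eq_default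
        simpa using hlen
      have h2 : T.getD i' [] = [] := List.getD_eq_default T [] (by omega)
      rw [h1, h2]
  · simp only [List.getD]
    rw [List.getElem?_set_ne (fun h => hii h.symm)]

-- the intended Int content of A's table cell (i, j)
def specT (s t : List Char) (i j : ℕ) : Int := zval (TaZ s t i j)

-- ---------- loop invariants for A's four table-filling loops ----------

def Inv2 (s t : List Char) (T : List (List Int)) (k : ℕ) : Prop :=
  ShapeT T s.length t.length ∧ ∀ j : ℕ, j < k → tg T 0 j = specT s t 0 j

def Inv3 (s t : List Char) (T : List (List Int)) (k : ℕ) : Prop :=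
  ShapeT T s.length t.length ∧ (∀ j : ℕ, j < t.length → tg T 0 j = specT s t 0 j) ∧
    (∀ i : ℕ, i < k → tg T i 0 = specT s t i 0)

def Inv4 (s t : List Char) (T : List (List Int)) (k : ℕ) : Prop :=
  ShapeT T s.length t.length ∧ (∀ i : ℕ, i < k → ∀ j : ℕ, j < t.length → tg T i j = specT s t i j) ∧
    (∀ i : ℕ, i < s.length → tg T i 0 = specT s t i 0)

def Inv5 (s t : List Char) (T : List (List Int)) (r k : ℕ) : Prop :=
  ShapeT T s.length t.length ∧ (∀ i : ℕ, i < r → ∀ j : ℕ, j < t.length → tg T i j = specT s t i j) ∧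
    (∀ i : ℕ, i < s.length → tg T i 0 = specT s t i 0) ∧
    (∀ j : ℕ, j < k → tg T r j = specT s t r j)

lemma stage1 (s t : List Char) (hm : 1 ≤ s.length) (hn : 1 ≤ t.length) :
    Inv2 s t (tset (List.replicate (s.length : Int).toNat (List.replicate (t.length : Int).toNat (0 : Int))) 0 0
      (if PySem.List.pyGetD s 0 ' ' = PySem.List.pyGetD t 0 ' ' then 1 else 0)) 1 := by
  have hrep : ShapeT (List.replicate (s.length : Int).toNat (List.replicate (t.length : Int).toNat (0 : Int))) s.length t.length := by
    simpa using shape_replicate s.length t.length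
  rw [tset_zero_zero]
  constructor
  · exact shape_set hrep (by omega) 0 _
  · intro j hj
    interval_cases j
    rw [tg_set_self hrep (by omega) (by omega)]
    rw [pyGetD_zero_char s, pyGetD_zero_char t]
    simp only [specT, TaZ_zz]
    split <;> simp [zval_one, zval_zero]

lemma stage2 (s t : List Char) (hm : 1 ≤ s.length) (hn : 1 ≤ t.length) (k : ℕ) (h1 : 1 ≤ k)
    (hk : k ≤ t.length) (T : List (List Int)) (hT : Inv2 s t T 1) :
    Inv2 s t ((PySem.List.pyRange 1 (k : Int) 1).foldl (fun T i =>
      tset T 0 i ((tget T 0 (i - 1) +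
        (if PySem.List.pyGetD s 0 ' ' = PySem.List.pyGetD t i ' ' then 1 else 0)) % pvP)) T) k := by
  induction k, h1 using Nat.le_induction with
  | base => rw [PySem.List.pyRange_one_eq_nil (by norm_num)]; exact hT
  | succ k h1 ih =>
    have ihk := ih (by omega)
    rw [show ((k + 1 : ℕ) : Int) = (k : Int) + 1 from by push_cast; ring,
        PySem.List.pyRange_one_succ_right (by exact_mod_cast h1), List.foldl_append]
    set T' := (PySem.List.pyRange 1 (k : Int) 1).foldl _ T with hT'
    obtain ⟨hs, hrow⟩ := ihk
    simp only [List.foldl_cons, List.foldl_nil]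
    have hcast : ((k : Int)) - 1 = (((k - 1 : ℕ)) : Int) := by push_cast [h1]; ring
    rw [hcast, tget_zero_natCast, tset_zero_natCast,
        pyGetD_zero_char s, PySem.List.pyGetD_natCast t k ' ']
    have hval : (tg T' 0 (k - 1) +
        (if s.getD 0 ' ' = t.getD k ' ' then (1:Int) else 0)) % pvP = specT s t 0 k := by
      rw [hrow (k - 1) (by omega), mod_eq_zval]
      unfold specT
      congr 1
      push_cast
      rw [cast_zval]
      rw [show TaZ s t 0 k = TaZ s t 0 ((k - 1) + 1) from by rw [Nat.sub_add_cancel h1], TaZ_zs]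
      simp [Nat.sub_add_cancel h1]
    constructor
    · exact shape_set hs (by omega) _ _
    · intro j hj
      by_cases hjk : j = k
      · subst hjk
        rw [tg_set_self hs (by omega) (by omega), hval]
      · rw [tg_set_ne _ _ _ (by omega)]
        exact hrow j (by omega)

lemma stage3 (s t : List Char) (hm : 1 ≤ s.length) (hn : 1 ≤ t.length) (k : ℕ) (h1 : 1 ≤ k)
    (hk : k ≤ s.length) (T : List (List Int)) (hT : Inv3 s t T 1) :
    Inv3 s t ((PySem.List.pyRange 1 (k : Int) 1).foldl (fun T i =>
      tset T i 0 (tget T (i - 1) 0 % pvP)) T) k := by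
  induction k, h1 using Nat.le_induction with
  | base => rw [PySem.List.pyRange_one_eq_nil (by norm_num)]; exact hT
  | succ k h1 ih =>
    have ihk := ih (by omega)
    rw [show ((k + 1 : ℕ) : Int) = (k : Int) + 1 from by push_cast; ring,
        PySem.List.pyRange_one_succ_right (by exact_mod_cast h1), List.foldl_append]
    set T' := (PySem.List.pyRange 1 (k : Int) 1).foldl _ T with hT'
    obtain ⟨hs, hrow0, hcol⟩ := ihk
    simp only [List.foldl_cons, List.foldl_nil]
    have hcast : ((k : Int)) - 1 = (((k - 1 : ℕ)) : Int) := by push_cast [h1]; ring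
    rw [hcast, tget_natCast_zero, tset_natCast_zero]
    have hval : tg T' (k - 1) 0 % pvP = specT s t k 0 := by
      rw [hcol (k - 1) (by omega), mod_eq_zval]
      unfold specT
      congr 1
      rw [cast_zval]
      rw [show TaZ s t k 0 = TaZ s t ((k - 1) + 1) 0 from by rw [Nat.sub_add_cancel h1], TaZ_sz]
    refine ⟨shape_set hs (by omega) _ _, ?_, ?_⟩
    · intro j hj
      rw [tg_set_ne _ _ _ (by omega)]
      exact hrow0 j hj
    · intro i hi
      by_cases hik : i = k
      · subst hik
        rw [tg_set_self hs (by omega) (by omega), hval]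
      · rw [tg_set_ne _ _ _ (by omega)]
        exact hcol i (by omega)

lemma stage5 (s t : List Char) (hn : 1 ≤ t.length) (r : ℕ) (hr1 : 1 ≤ r) (hrm : r < s.length)
    (k : ℕ) (h1 : 1 ≤ k) (hk : k ≤ t.length) (T : List (List Int)) (hT : Inv5 s t T r 1) :
    Inv5 s t ((PySem.List.pyRange 1 (k : Int) 1).foldl (fun T j =>
      tset T (r : Int) j ((tget T ((r : Int) - 1) j + tget T (r : Int) (j - 1) +
        (if PySem.List.pyGetD s (r : Int) ' ' = PySem.List.pyGetD t j ' ' then 0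
         else -(tget T ((r : Int) - 1) (j - 1)))) % pvP)) T) r k := by
  induction k, h1 using Nat.le_induction with
  | base => rw [PySem.List.pyRange_one_eq_nil (by norm_num)]; exact hT
  | succ c h1 ih =>
    have ihk := ih (by omega)
    rw [show ((c + 1 : ℕ) : Int) = (c : Int) + 1 from by push_cast; ring,
        PySem.List.pyRange_one_succ_right (by exact_mod_cast h1), List.foldl_append]
    set T' := (PySem.List.pyRange 1 (c : Int) 1).foldl _ T with hT'
    obtain ⟨hs, hrows, hcol, hrowr⟩ := ihk
    simp only [List.foldl_cons, List.foldl_nil]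
    have hcr : ((r : Int)) - 1 = (((r - 1 : ℕ)) : Int) := by push_cast [hr1]; ring
    have hcc : ((c : Int)) - 1 = (((c - 1 : ℕ)) : Int) := by push_cast [h1]; ring
    rw [hcr, hcc, tget_natCast, tget_natCast, tget_natCast, tset_natCast,
        PySem.List.pyGetD_natCast s r ' ', PySem.List.pyGetD_natCast t c ' ']
    have hval : (tg T' (r - 1) c + tg T' r (c - 1) +
        (if s.getD r ' ' = t.getD c ' ' then 0
         else -(tg T' (r - 1) (c - 1)))) % pvP = specT s t r c := by
      rw [hrows (r - 1) (by omega) c (by omega), hrowr (c - 1) (by omega),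
          hrows (r - 1) (by omega) (c - 1) (by omega), mod_eq_zval]
      have hrr : specT s t r c = zval (TaZ s t ((r - 1) + 1) ((c - 1) + 1)) := by
        rw [Nat.sub_add_cancel hr1, Nat.sub_add_cancel h1]; rfl
      rw [hrr, TaZ_ss, Nat.sub_add_cancel hr1, Nat.sub_add_cancel h1]
      unfold specT
      congr 1
      by_cases hch : s.getD r ' ' = t.getD c ' '
      · simp only [if_pos hch]
        push_cast
        simp [cast_zval]
      · simp only [if_neg hch]
        push_cast
        simp [cast_zval]
    refine ⟨shape_set hs (by omega) _ _, ?_, ?_, ?_⟩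
    · intro i hi j hj
      rw [tg_set_ne _ _ _ (by omega)]
      exact hrows i hi j hj
    · intro i hi
      rw [tg_set_ne _ _ _ (by omega)]
      exact hcol i hi
    · intro j hj
      by_cases hjc : j = c
      · subst hjc
        rw [tg_set_self hs (by omega) (by omega), hval]
      · rw [tg_set_ne _ _ _ (by omega)]
        exact hrowr j (by omega)

lemma stage4 (s t : List Char) (hm : 1 ≤ s.length) (hn : 1 ≤ t.length) (k : ℕ) (h1 : 1 ≤ k)
    (hk : k ≤ s.length) (T : List (List Int)) (hT : Inv4 s t T 1) :
    Inv4 s t ((PySem.List.pyRange 1 (k : Int) 1).foldl (fun T i =>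
      (PySem.List.pyRange 1 ((t.length : Int)) 1).foldl (fun T j =>
        tset T i j ((tget T (i - 1) j + tget T i (j - 1) +
          (if PySem.List.pyGetD s i ' ' = PySem.List.pyGetD t j ' ' then 0
           else -(tget T (i - 1) (j - 1)))) % pvP)) T) T) k := by
  induction k, h1 using Nat.le_induction with
  | base =>
    rw [show PySem.List.pyRange 1 (((1 : ℕ) : Int)) 1 = [] from
          PySem.List.pyRange_one_eq_nil (by norm_num)]
    exact hT
  | succ k h1 ih =>
    have ihk := ih (by omega)
    rw [show ((k + 1 : ℕ) : Int) = (k : Int) + 1 from by push_cast; ring,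
        PySem.List.pyRange_one_succ_right (by exact_mod_cast h1), List.foldl_append]
    set T' := (PySem.List.pyRange 1 (k : Int) 1).foldl _ T with hT'
    obtain ⟨hs, hfull, hcol⟩ := ihk
    simp only [List.foldl_cons, List.foldl_nil]
    have h5 : Inv5 s t T' k 1 := by
      refine ⟨hs, hfull, hcol, ?_⟩
      intro j hj
      interval_cases j
      exact hcol k (by omega)
    have h5' := stage5 s t hn k h1 (by omega) t.length hn (le_refl _) T' h5
    obtain ⟨hs', hrows', hcol', hrowr'⟩ := h5'
    refine ⟨hs', ?_, hcol'⟩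
    intro i hi j hj
    by_cases hik : i = k
    · subst hik
      exact hrowr' j hj
    · exact hrows' i (by omega) j hj

lemma inv2_to_inv3 (s t : List Char) (hn : 1 ≤ t.length) (T : List (List Int))
    (h : Inv2 s t T t.length) : Inv3 s t T 1 := by
  refine ⟨h.1, fun j hj => h.2 j hj, fun i hi => ?_⟩
  interval_cases i
  exact h.2 0 (by omega)

lemma inv3_to_inv4 (s t : List Char) (hn : 1 ≤ t.length) (T : List (List Int))
    (h : Inv3 s t T s.length) : Inv4 s t T 1 := by
  refine ⟨h.1, fun i hi j hj => ?_, h.2.2⟩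
  interval_cases i
  exact h.2.1 j hj

lemma countSubA_correct (s t : List Char) (hm : 1 ≤ s.length) (hn : 1 ≤ t.length) :
    countSubA s t = specT s t (s.length - 1) (t.length - 1) := by
  simp only [countSubA]
  have h1 := stage1 s t hm hn
  have h2 := stage2 s t hm hn t.length hn (le_refl _) _ h1
  have h3pre := inv2_to_inv3 s t hn _ h2
  have h3 := stage3 s t hm hn s.length hm (le_refl _) _ h3pre
  have h4pre := inv3_to_inv4 s t hn _ h3
  have h4 := stage4 s t hm hn s.length hm (le_refl _) _ h4pre
  have hcm : ((s.length : Int)) - 1 = (((s.length - 1 : ℕ)) : Int) := by push_cast [hm]; ring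
  have hcn : ((t.length : Int)) - 1 = (((t.length - 1 : ℕ)) : Int) := by push_cast [hn]; ring
  rw [hcm, hcn, tget_natCast]
  exact h4.2.1 (s.length - 1) (by omega) (t.length - 1) (by omega)

-- ---------- correctness of port B's rolling-row DP ----------

def specN (s t : List Char) (k j : ℕ) : Int := zval (NnZ s t k j)

lemma pyGetD_append_neg_one (l : List Int) (x : Int) :
    PySem.List.pyGetD (l ++ [x]) (-1) 0 = x := by
  simp [PySem.List.pyGetD, PySem.List.pyGet?, PySem.List.pyIdx?]

lemma getD_append_len (u v : List Char) (c : Char) : (u ++ c :: v).getD u.length ' ' = c := by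
  simp only [List.getD]
  rw [List.getElem?_append_right (le_refl u.length)]
  simp

lemma zip3_eq (f : ℕ → Int) (t : List Char) :
    ((((List.range (t.length + 1)).map f).zip
        (PySem.List.slice ((List.range (t.length + 1)).map f) (some 1) none)).zip t) =
      (List.range t.length).map (fun j => ((f j, f (j + 1)), t.getD j ' ')) := by
  rw [PySem.List.slice_from_one]
  apply List.ext_getElem
  · simp
  · intro i h1 h2
    have hi : i < t.length := by simpa using h2
    simp [List.getElem_zip, List.getElem_tail, List.getElem?_eq_getElem hi]

lemma innerRow (c : Char) (e : ℕ → (Int × Int) × Char) (v : ℕ → Int) (J : ℕ)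
    (hv0 : v 0 = 0)
    (hstep : ∀ j : ℕ, j < J → v (j + 1) =
      ((e j).1.2 + v j - (e j).1.1 + (if c = (e j).2 then (e j).1.1 + 1 else 0)) % pvP) :
    ((List.range J).map e).foldl (fun cur x =>
      cur ++ [(x.1.2 + PySem.List.pyGetD cur (-1) 0 - x.1.1 +
               (if c = x.2 then x.1.1 + 1 else 0)) % pvP]) [0] =
      (List.range (J + 1)).map v := by
  induction J with
  | zero => simp [hv0]
  | succ J ih =>
    rw [List.range_succ, List.map_append, List.foldl_append,
        ih (fun j hj => hstep j (by omega))]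
    simp only [List.map_cons, List.map_nil, List.foldl_cons, List.foldl_nil]
    rw [show (List.range (J + 1)).map v = (List.range J).map v ++ [v J] from by
          rw [List.range_succ, List.map_append]; rfl,
        pyGetD_append_neg_one]
    rw [List.range_succ, List.map_append, List.range_succ, List.map_append]
    simp only [List.map_cons, List.map_nil, List.append_assoc]
    rw [← hstep J (by omega)]

lemma rowStep (s t : List Char) (k : ℕ) (c : Char) (hc : c = s.getD k ' ') :
    (((((List.range (t.length + 1)).map (fun j => specN s t k j)).zip
        (PySem.List.slice ((List.range (t.length + 1)).map (fun j => specN s t k j)) (some 1) none)).zip t).foldl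
      (fun cur x =>
        cur ++ [(x.1.2 + PySem.List.pyGetD cur (-1) 0 - x.1.1 +
                 (if c = x.2 then x.1.1 + 1 else 0)) % pvP]) [0]) =
      (List.range (t.length + 1)).map (fun j => specN s t (k + 1) j) := by
  rw [zip3_eq (fun j => specN s t k j) t]
  apply innerRow c _ _ t.length
  · simp [specN, NnZ_any_zero, zval_zero]
  · intro j hj
    simp only
    rw [mod_eq_zval]
    unfold specN
    congr 1
    push_cast
    rw [NnZ_step]
    subst hc
    by_cases hch : s.getD k ' ' = t.getD j ' '
    · simp only [if_pos hch]
      simp [cast_zval]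
    · simp only [if_neg hch]
      simp [cast_zval]

lemma commonB_correct (s t : List Char) : commonB s t = specN s t s.length t.length := by
  simp only [commonB]
  have hmain : ∀ (v u : List Char), s = u ++ v →
      v.foldl (fun prev c =>
        ((prev.zip (PySem.List.slice prev (some 1) none)).zip t).foldl (fun cur x =>
          cur ++ [(x.1.2 + PySem.List.pyGetD cur (-1) 0 - x.1.1 +
                   (if c = x.2 then x.1.1 + 1 else 0)) % pvP]) [0])
        ((List.range (t.length + 1)).map (fun j => specN s t u.length j)) =
      (List.range (t.length + 1)).map (fun j => specN s t (u.length + v.length) j) := by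
    intro v
    induction v with
    | nil => intro u _; simp
    | cons c v' ih =>
      intro u hs
      simp only [List.foldl_cons]
      rw [rowStep s t u.length c (by rw [hs, getD_append_len])]
      have ih' := ih (u ++ [c]) (by simp [hs])
      simp only [List.length_append, List.length_cons, List.length_nil] at ih' ⊢
      rw [show u.length + (v'.length + 1) = u.length + 1 + v'.length from by omega]
      exact ih'
  have h0 : List.replicate (t.length + 1) (0 : Int) =
      (List.range (t.length + 1)).map (fun j => specN s t 0 j) := by
    rw [show (fun j => specN s t 0 j) = (fun _ : ℕ => (0 : Int)) from
          funext (fun j => by simp [specN, NnZ_zero, zval_zero]),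
        List.map_const']
    simp
  have hm0 := hmain s [] rfl
  simp only [List.length_nil, Nat.zero_add] at hm0
  rw [h0, hm0]
  rw [PySem.List.pyGetD_natCast]
  rw [List.getD_eq_getElem _ 0 (by simp)]
  simp

-- ---------- glue: both main loops compute the same modular sum ----------

lemma sumfold (l : List Int) (g : Int → Int) (h : Int → Zp)
    (hg : ∀ x ∈ l, ((g x : Int) : Zp) = h x) (z : Zp) :
    l.foldl (fun R i => (R + g i) % pvP) (zval z) =
      zval (l.foldl (fun Z i => Z + h i) z) := by
  induction l generalizing z with
  | nil => simp
  | cons x xs ih =>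
    simp only [List.foldl_cons]
    rw [mod_eq_zval,
        show ((zval z + g x : Int) : Zp) = z + h x from by
          push_cast; rw [cast_zval, hg x (by simp)],
        ih (fun y hy => hg y (by simp [hy]))]

lemma perSplit (L : List Char) (x : Int) (hx1 : 1 ≤ x) (hx2 : x < (L.length : Int)) :
    TaZ (L.drop x.toNat) (L.take x.toNat)
        ((L.drop x.toNat).length - 1) ((L.take x.toNat).length - 1) =
      NnZ (L.drop x.toNat) (L.take x.toNat)
          (L.drop x.toNat).length (L.take x.toNat).length -
        NnZ (L.drop (x.toNat + 1)) (L.take x.toNat)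
          (L.drop (x.toNat + 1)).length (L.take x.toNat).length := by
  have hm : 1 ≤ (L.drop x.toNat).length := by simp [List.length_drop]; omega
  have hn : 1 ≤ (L.take x.toNat).length := by simp [List.length_take]; omega
  have h := keyTN (L.drop x.toNat) (L.take x.toNat)
      ((L.drop x.toNat).length - 1) ((L.take x.toNat).length - 1)
  rw [Nat.sub_add_cancel hm, Nat.sub_add_cancel hn, List.tail_drop] at h
  rw [h, show (L.drop x.toNat).length - 1 = (L.drop (x.toNat + 1)).length from by
        simp [List.length_drop]; omega]

lemma main_eq (S : String) :
    count_square_subsequences S = count_square_subsequences_alt S := by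
  simp only [count_square_subsequences, count_square_subsequences_alt]
  have hfun : (fun (total i : Int) =>
        (total + commonB (PySem.List.slice S.toList (some i) none) (PySem.List.slice S.toList none (some i))
               - commonB (PySem.List.slice S.toList (some (i + 1)) none) (PySem.List.slice S.toList none (some i))) % pvP) =
      (fun (total i : Int) =>
        (total + (commonB (PySem.List.slice S.toList (some i) none) (PySem.List.slice S.toList none (some i))
               - commonB (PySem.List.slice S.toList (some (i + 1)) none) (PySem.List.slice S.toList none (some i)))) % pvP) := by
    funext a b
    rw [add_sub_assoc]
  rw [hfun]
  rw [show (0 : Int) = zval 0 from zval_zero.symm]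
  rw [sumfold (PySem.List.pyRange 1 ((S.toList.length : Int)) 1) _
        (fun i => TaZ (S.toList.drop i.toNat) (S.toList.take i.toNat)
          ((S.toList.drop i.toNat).length - 1) ((S.toList.take i.toNat).length - 1))
        (fun x hx => ?_) 0,
      sumfold (PySem.List.pyRange 1 ((S.toList.length : Int)) 1) _
        (fun i => NnZ (S.toList.drop i.toNat) (S.toList.take i.toNat)
            (S.toList.drop i.toNat).length (S.toList.take i.toNat).length -
          NnZ (S.toList.drop (i.toNat + 1)) (S.toList.take i.toNat)
            (S.toList.drop (i.toNat + 1)).length (S.toList.take i.toNat).length)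
        (fun x hx => ?_) 0]
  · congr 1
    apply PySem.List.foldl_congr_mem
    intro acc x hx
    rw [PySem.List.mem_pyRange_one] at hx
    rw [perSplit S.toList x hx.1 hx.2]
  · -- B-side element cast
    rw [PySem.List.mem_pyRange_one] at hx
    obtain ⟨hxa, hxb⟩ := hx
    have hx1 : (0 : Int) ≤ x := by omega
    have hx1' : (0 : Int) ≤ x + 1 := by omega
    rw [PySem.List.slice_from S.toList hx1, PySem.List.slice_to S.toList hx1,
        PySem.List.slice_from S.toList hx1']
    rw [show (x + 1).toNat = x.toNat + 1 from by omega]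
    rw [commonB_correct, commonB_correct]
    unfold specN
    push_cast
    rw [cast_zval, cast_zval]
  · -- A-side element cast
    rw [PySem.List.mem_pyRange_one] at hx
    obtain ⟨hxa, hxb⟩ := hx
    have hx1 : (0 : Int) ≤ x := by omega
    rw [PySem.List.slice_from S.toList hx1, PySem.List.slice_to S.toList hx1]
    have hm : 1 ≤ (S.toList.drop x.toNat).length := by rw [List.length_drop]; omega
    have hn : 1 ≤ (S.toList.take x.toNat).length := by rw [List.length_take]; omega
    rw [countSubA_correct _ _ hm hn]
    unfold specT
    rw [cast_zval]

-- ===== VERDICT (by name: the statement is the Claim_ definition above) =====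
theorem count_square_subsequences_spec : Claim_equal_count_square_subsequences := by
  intro S _
  unfold Spec_count_square_subsequences
  exact main_eq S
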